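-- pv_equiv track=rewrite | github.com/mehmetaliberk/E-Book-Analysis-in-Python | E-Book Analysis in Python.py | REM_SYMB
-- ===== SOURCE A (Python) =====
-- SYMBOLS = [",",".","?",".","é","!","'","^","+","%","&","/","=","?",
--            "_","<",">","£","#","$","½","{","[","]","}","|","@","-",
--            "*",":",";","æ","ß","1","2","3","4","5","6","7","8","9","0","(", ")" ,"\\",'"',"'","~"]
--
-- def REM_SYMB(CLEAN_WORDS):#function to remove symbols
--    W_SYMB_WORDS=list()
--    for WORD in CLEAN_WORDS:#taking clean words list as a reference
--       for SYMB in SYMBOLS: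
--          if SYMB in WORD:
--             SYMB_index=WORD.index(SYMB)#I checked index to remove all symbols from words
--             WORD=WORD.replace(SYMB,"")#replacing symbols
--             WORD=WORD[0:SYMB_index]#I found the index of symbols and took the word up there
--       if(len(WORD)>1):#i did this trick here too
--          W_SYMB_WORDS.append(WORD)#appending clean words to cleanest list
--    return  W_SYMB_WORDS
-- ===== SOURCE B (Python) =====
-- SYMBOL_SET = {",",".","?","é","!","'","^","+","%","&","/","=",
--               "_","<",">","£","#","$","½","{","[","]","}","|","@","-",
--               "*",":",";","æ","ß","1","2","3","4","5","6","7","8","9","0","(",")","\\",'"',"~"}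
--
-- def REM_SYMB(CLEAN_WORDS):
--     out = []
--     for word in CLEAN_WORDS:
--         i = next((k for k, c in enumerate(word) if c in SYMBOL_SET), len(word))
--         if i > 1:
--             out.append(word[:i])
--     return out
-- ===== Notes on version B (the rewrite author's own statement) =====
-- stated objective: simpler
-- what changed: A loops over the ~48-entry SYMBOLS list per word, doing a substring search, a full replace and a truncation for each symbol; B scans each word's characters once left to right, truncates at the first character belonging to a symbol set built once, and keeps the prefix if longer than 1.
import Mathlib
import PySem

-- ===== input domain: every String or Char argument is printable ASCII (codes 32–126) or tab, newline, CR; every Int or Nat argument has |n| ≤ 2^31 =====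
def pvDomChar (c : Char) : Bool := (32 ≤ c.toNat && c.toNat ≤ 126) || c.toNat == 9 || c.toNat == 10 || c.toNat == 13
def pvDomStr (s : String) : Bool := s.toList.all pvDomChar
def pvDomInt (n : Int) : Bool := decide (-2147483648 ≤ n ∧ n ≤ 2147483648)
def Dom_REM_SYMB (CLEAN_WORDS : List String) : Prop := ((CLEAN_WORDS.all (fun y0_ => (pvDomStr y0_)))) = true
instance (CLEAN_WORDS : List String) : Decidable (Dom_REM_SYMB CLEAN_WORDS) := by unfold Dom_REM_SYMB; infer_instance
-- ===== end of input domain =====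

-- B rewrites A's per-word symbol-list loop as a single left-to-right scan of the word's
-- characters (first symbol position, then truncate); same return value, simpler shape.

-- ===== PORT A =====
def SYMBOLS : List String := [",", ".", "?", ".", "é", "!", "'", "^", "+", "%", "&", "/", "=", "?",
  "_", "<", ">", "£", "#", "$", "½", "{", "[", "]", "}", "|", "@", "-",
  "*", ":", ";", "æ", "ß", "1", "2", "3", "4", "5", "6", "7", "8", "9", "0", "(", ")", "\\", "\"", "'", "~"]

def REM_SYMB (CLEAN_WORDS : List String) : List String :=
  CLEAN_WORDS.foldl (fun W_SYMB_WORDS WORD0 =>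
    let WORD := SYMBOLS.foldl (fun WORD SYMB =>
      if PySem.Str.isIn SYMB WORD then
        let SYMB_index := PySem.Str.find WORD SYMB   -- WORD.index(SYMB); present, so = find
        let WORD := PySem.Str.replace WORD SYMB ""
        PySem.Str.slice WORD (some 0) (some SYMB_index)
      else WORD) WORD0
    if 1 < PySem.Str.len WORD then W_SYMB_WORDS ++ [WORD] else W_SYMB_WORDS) []

-- ===== PORT B =====
-- SYMBOL_SET = { the same characters } (a Python set literal; duplicates collapse)
def SYMCHARLIST : List Char := [',', '.', '?', '.', 'é', '!', '\'', '^', '+', '%', '&', '/', '=', '?',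
  '_', '<', '>', '£', '#', '$', '½', '{', '[', ']', '}', '|', '@', '-',
  '*', ':', ';', 'æ', 'ß', '1', '2', '3', '4', '5', '6', '7', '8', '9', '0', '(', ')', '\\', '"', '\'', '~']

def SYMBOL_SET : PySem.Set Char := PySem.Set.ofList SYMCHARLIST

def REM_SYMB_alt (CLEAN_WORDS : List String) : List String :=
  CLEAN_WORDS.foldl (fun out word =>
    let cs := word.toList
    let i := cs.findIdx (fun c => SYMBOL_SET.contains c)   -- next(k for k,c … ), default len(word)
    if 1 < i then out ++ [String.ofList (cs.take i)] else out) []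

-- ===== PRECONDITION & SPEC =====
def Spec_REM_SYMB (CLEAN_WORDS : List String) (out : List String) : Prop := out = REM_SYMB_alt CLEAN_WORDS
instance (CLEAN_WORDS : List String) (out : List String) : Decidable (Spec_REM_SYMB CLEAN_WORDS out) := by unfold Spec_REM_SYMB; infer_instance

-- ===== CLAIM (what is proved, stated in full; the proofs are below) =====
def Claim_equal_REM_SYMB : Prop := ∀ (CLEAN_WORDS : List String), Dom_REM_SYMB CLEAN_WORDS → Spec_REM_SYMB CLEAN_WORDS (REM_SYMB CLEAN_WORDS)

-- ===== LEMMAS AND PROOFS =====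

-- a one-character pattern is a prefix iff it is the head
theorem pv_singleton_prefix (c : Char) (l : List Char) : [c] <+: l ↔ l.head? = some c := by
  cases l with
  | nil => simp
  | cons x t => simp [List.cons_prefix_cons, eq_comm]

-- str.find on a one-character needle that occurs is List.findIdx
theorem pv_find_single (c : Char) (w : List Char) (h : c ∈ w) :
    PySem.Chars.find w [c] = (w.findIdx (· == c) : Int) := by
  have h0 : 0 ≤ PySem.Chars.find w [c] :=
    (PySem.Chars.find_nonneg_iff w [c]).mpr ((List.singleton_infix_iff c w).mpr h)
  obtain ⟨hpre, hmin⟩ := PySem.Chars.find_spec h0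
  set n := (PySem.Chars.find w [c]).toNat with hn
  have hget : w[n]? = some c := by
    rw [pv_singleton_prefix] at hpre
    simpa [List.head?_drop] using hpre
  have hnlt : n < w.length := (List.getElem?_eq_some_iff.mp hget).1
  obtain ⟨_hx, hwc⟩ := List.getElem?_eq_some_iff.mp hget
  have hidx : w.findIdx (· == c) = n := by
    have hle : w.findIdx (· == c) ≤ n := by
      by_contra hgt
      have := List.not_of_lt_findIdx (p := (· == c)) (xs := w) (i := n) (by omega)
      exact absurd hwc (by simpa using this)
    rcases Nat.lt_or_ge (w.findIdx (· == c)) n with hlt | hge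
    · exfalso
      apply hmin _ hlt
      rw [pv_singleton_prefix]
      have hl : w.findIdx (· == c) < w.length := by omega
      have := List.findIdx_getElem (p := (· == c)) (xs := w) (w := hl)
      simp at this
      simp [List.head?_drop, hl, this]
    · omega
  rw [hidx, hn, Int.toNat_of_nonneg h0]

-- str.replace of a one-character needle by "" is List.filter
theorem pv_replace_go (c : Char) (fuel : Nat) (l acc : List Char) (h : l.length ≤ fuel) :
    PySem.Chars.replace.go [c] [] fuel l acc = acc.reverse ++ l.filter (· != c) := by
  induction fuel generalizing l acc with
  | zero =>
    cases l with
    | nil => simp [PySem.Chars.replace.go]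
    | cons x t => simp at h
  | succ m ih =>
    cases l with
    | nil => simp [PySem.Chars.replace.go]
    | cons x t =>
      by_cases hx : x = c
      · subst hx
        rw [show PySem.Chars.replace.go [x] [] (m+1) (x :: t) acc =
              PySem.Chars.replace.go [x] [] m (List.drop 1 (x :: t)) ([].reverse ++ acc) by
            simp [PySem.Chars.replace.go, List.isPrefixOf]]
        simp only [List.drop_one, List.tail_cons, List.reverse_nil, List.nil_append]
        rw [ih t acc (by simpa using Nat.le_of_succ_le_succ h)]
        simp
      · rw [show PySem.Chars.replace.go [c] [] (m+1) (x :: t) acc =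
              PySem.Chars.replace.go [c] [] m t (x :: acc) by
            simp [PySem.Chars.replace.go, List.isPrefixOf, Ne.symm hx]]
        rw [ih t (x :: acc) (by simpa using Nat.le_of_succ_le_succ h)]
        simp [hx]

theorem pv_replace_single (c : Char) (w : List Char) :
    PySem.Chars.replace w [c] [] = w.filter (· != c) := by
  have h := pv_replace_go c w.length w [] le_rfl
  simpa [PySem.Chars.replace] using h

-- findIdx is the length of the complementary takeWhile
theorem pv_findIdx_takeWhile (p : Char → Bool) (l : List Char) :
    l.findIdx p = (l.takeWhile (fun c => !p c)).length := by
  induction l with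
  | nil => rfl
  | cons x t ih => by_cases h : p x <;> simp [List.findIdx_cons, h, ih]

theorem pv_takeWhile_takeWhile (p q : Char → Bool) (l : List Char) :
    (l.takeWhile q).takeWhile p = l.takeWhile (fun a => q a && p a) := by
  induction l with
  | nil => rfl
  | cons x t ih => by_cases hq : q x <;> by_cases hp : p x <;> simp [hq, hp, ih]

theorem pv_take_filter (p : Char → Bool) (w : List Char) :
    (w.filter p).take (w.takeWhile p).length = w.takeWhile p := by
  induction w with
  | nil => rfl
  | cons x t ih => by_cases h : p x <;> simp [h, ih]

-- one pass of A's inner loop, on the character list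
theorem pv_stepA (c : Char) (w : List Char) :
    (if PySem.Chars.isIn [c] w then
        PySem.Chars.slice (PySem.Chars.replace w [c] []) (some 0) (some (PySem.Chars.find w [c]))
      else w) = w.takeWhile (fun x => x != c) := by
  by_cases h : c ∈ w
  · have hin : PySem.Chars.isIn [c] w = true := by
      rcases hb : PySem.Chars.isIn [c] w with _ | _
      · rw [PySem.Chars.isIn_eq_false_iff, List.singleton_infix_iff] at hb
        exact absurd h hb
      · rfl
    rw [if_pos hin, pv_find_single c w h, pv_replace_single,
      PySem.Chars.slice_eq_listSlice, PySem.List.slice_zero_start,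
      PySem.List.slice_to _ (by positivity), Int.toNat_natCast,
      pv_findIdx_takeWhile (· == c)]
    simpa using pv_take_filter (fun x => x != c) w
  · have hin : PySem.Chars.isIn [c] w = false := by
      rw [PySem.Chars.isIn_eq_false_iff]
      simpa [List.singleton_infix_iff] using h
    rw [if_neg (by simp [hin]), Eq.comm, List.takeWhile_eq_self_iff]
    intro x hx
    simp only [bne_iff_ne, ne_eq]
    exact fun hxc => h (hxc ▸ hx)

-- A's whole inner loop over a list of one-character symbol strings truncates at the
-- first character that is one of the symbols
theorem pv_foldA (syms : List Char) (W : String) :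
    (syms.map (fun c => String.ofList [c])).foldl (fun WORD SYMB =>
        if PySem.Str.isIn SYMB WORD then
          PySem.Str.slice (PySem.Str.replace WORD SYMB "") (some 0) (some (PySem.Str.find WORD SYMB))
        else WORD) W
      = String.ofList (W.toList.takeWhile (fun x => !syms.contains x)) := by
  induction syms generalizing W with
  | nil =>
    simp only [List.map_nil, List.foldl_nil]
    rw [List.takeWhile_eq_self_iff.mpr (by intro x _; simp), String.ofList_toList]
  | cons c rest ih =>
    simp only [List.map_cons, List.foldl_cons]
    have hstep : (if PySem.Str.isIn (String.ofList [c]) W then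
          PySem.Str.slice (PySem.Str.replace W (String.ofList [c]) "") (some 0)
            (some (PySem.Str.find W (String.ofList [c])))
        else W) = String.ofList (W.toList.takeWhile (fun x => x != c)) := by
      have h := pv_stepA c W.toList
      rw [← String.ofList_toList (s := (if PySem.Str.isIn (String.ofList [c]) W then _ else _))]
      congr 1
      by_cases hin : PySem.Chars.isIn [c] W.toList
      · simp only [PySem.Str.isIn_eq, String.toList_ofList, hin, if_true] at *
        rw [← h, PySem.Str.toList_slice, PySem.Str.toList_replace]
        simp
      · simp only [PySem.Str.isIn_eq, String.toList_ofList, hin] at *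
        rw [← h]
        simp
    rw [hstep, ih, String.toList_ofList, pv_takeWhile_takeWhile]
    have hpred : (fun a => a != c && !rest.contains a) = (fun x : Char => !(c :: rest).contains x) := by
      funext x
      by_cases hx : x = c <;> simp [hx]
    rw [hpred]

-- ===== VERDICT (by name: the statement is the Claim_ definition above) =====
set_option maxRecDepth 8192 in
theorem REM_SYMB_spec : Claim_equal_REM_SYMB := by
  intro CLEAN_WORDS _
  unfold Spec_REM_SYMB REM_SYMB REM_SYMB_alt
  apply List.foldl_ext
  intro acc w _
  have hs : SYMBOLS = SYMCHARLIST.map (fun c => String.ofList [c]) := by rfl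
  rw [hs, pv_foldA]
  have hcont : (fun c => SYMBOL_SET.contains c) = (fun c => SYMCHARLIST.contains c) := by
    funext c
    rw [Bool.eq_iff_iff]
    rw [List.contains_iff_mem]
    simp [SYMBOL_SET, PySem.Set.contains, PySem.Set.mem_ofList]
  have hi : w.toList.findIdx (fun c => SYMBOL_SET.contains c)
      = (w.toList.takeWhile (fun x => !SYMCHARLIST.contains x)).length := by
    rw [hcont, pv_findIdx_takeWhile]
  have hpre := (List.prefix_iff_eq_take.mp
    (List.takeWhile_prefix (l := w.toList) (p := fun x => !SYMCHARLIST.contains x))).symm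
  simp only [PySem.Str.len_eq, String.toList_ofList, hi]
  by_cases hm : 1 < (w.toList.takeWhile (fun x => !SYMCHARLIST.contains x)).length
  · rw [if_pos (by exact_mod_cast hm), if_pos hm, hpre]
  · rw [if_neg (by exact_mod_cast hm), if_neg hm]
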